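-- pv_equiv track=rewrite | github.com/ngocuong0105/usaco | silver/split.py | solve
-- ===== SOURCE A (Python) =====
-- from heapq import heappush
-- from typing import Any
--
-- def min_enclosure(cows):
--     minn,maxx = [cows[0][1]],[-cows[0][1]]
--     l = cows[0][0]
--     left = [0]
--     for x,y in cows[1:]:
--         heappush(minn,y)
--         heappush(maxx,-y)
--         w = x-l
--         h = -maxx[0]-minn[0]
--         left.append(w*h)
--     minn,maxx = [cows[-1][1]],[-cows[-1][1]]
--     r = cows[-1][0]
--     right = [0]
--     for x,y in cows[::-1][1:]:
--         heappush(minn,y)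
--         heappush(maxx,-y)
--         w = r-x
--         h = -maxx[0]-minn[0]
--         right.append(w*h)
--     right.reverse()
--     return min(a+b for a,b in zip(left,right[1:]))
--
-- def solve(inp) -> Any:
--     cows = inp
--     l,r = min(i for i,_ in cows),max(i for i,_ in cows)
--     d,u = min(j for _,j in cows),max(j for _,j in cows)
--     area1 = (r-l)*(u-d)
--     cows.sort(key = lambda x: (x[0],-x[1]))
--     area2 = min(min_enclosure(cows),min_enclosure(sorted([(y,x) for x,y in cows],key = lambda x:(x[0],-x[1]))))
--     return area1 - area2
-- ===== SOURCE B (Python) =====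
-- def min_enclosure(cows):
--     # Divide and conquer over the gap positions: a segment [i, j) of the
--     # x-sorted cows contributes its middle gap directly (using the y-extrema of
--     # the full prefix and the full suffix) and recurses into the two halves.
--     n = len(cows)
--     l, r = cows[0][0], cows[-1][0]
--
--     def ext(i, j):
--         ys = [y for _, y in cows[i:j]]
--         return min(ys), max(ys)
--
--     def comb(a, b):
--         if a is None:
--             return b
--         if b is None:
--             return a
--         return min(a[0], b[0]), max(a[1], b[1])
--
--     def best(i, j, pre, suf):
--         # minimum split cost over the gaps strictly inside cows[i:j];
--         # pre / suf are the y-extrema of cows[:i] / cows[j:] (None if empty)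
--         if j - i == 1:
--             return None
--         m = (i + j) // 2
--         le, re = ext(i, m), ext(m, j)
--         plo, phi = comb(pre, le)
--         slo, shi = comb(re, suf)
--         cand = (cows[m - 1][0] - l) * (phi - plo) + (r - cows[m][0]) * (shi - slo)
--         for b in (best(i, m, pre, comb(re, suf)), best(m, j, comb(pre, le), suf)):
--             if b is not None:
--                 cand = min(cand, b)
--         return cand
--
--     return best(0, n, None, None)
--
--
-- def solve(inp):
--     cows = inp
--     l, r = min(i for i, _ in cows), max(i for i, _ in cows)
--     d, u = min(j for _, j in cows), max(j for _, j in cows)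
--     area1 = (r - l) * (u - d)
--     cows.sort(key=lambda x: (x[0], -x[1]))
--     area2 = min(min_enclosure(cows), min_enclosure(sorted([(y, x) for x, y in cows], key=lambda x: (x[0], -x[1]))))
--     return area1 - area2
-- ===== Notes on version B (the rewrite author's own statement) =====
-- stated objective: alternative
-- what changed: min_enclosure is rewritten as a divide-and-conquer over the gap positions: a segment of the x-sorted cows evaluates its middle split directly from the y-extrema of the full prefix and suffix (passed down and combined with the halves' extrema) and recurses into the two halves, replacing A's two heap-maintaining prefix/suffix sweeps, the reversed right list and the zip-of-area-lists minimum.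
import Mathlib
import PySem

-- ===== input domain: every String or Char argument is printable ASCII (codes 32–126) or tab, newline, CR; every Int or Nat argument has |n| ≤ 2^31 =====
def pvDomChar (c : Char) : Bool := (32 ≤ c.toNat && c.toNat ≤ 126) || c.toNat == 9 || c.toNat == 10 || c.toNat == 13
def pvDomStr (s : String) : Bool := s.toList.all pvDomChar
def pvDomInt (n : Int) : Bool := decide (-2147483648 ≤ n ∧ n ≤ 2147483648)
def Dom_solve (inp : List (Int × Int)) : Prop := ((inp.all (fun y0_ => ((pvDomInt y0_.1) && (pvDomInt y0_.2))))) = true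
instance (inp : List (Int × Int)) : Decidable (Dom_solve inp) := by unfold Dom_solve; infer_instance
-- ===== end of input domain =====

-- B replaces A's two heap-maintaining prefix/suffix sweeps (and the reversed right list and
-- zip-of-area-lists minimum) by a divide-and-conquer over the gap positions. Equivalence is
-- about the return value only (both Pythons sort `inp` in place identically).

-- ===== PORT A =====
-- heapq._siftdown(heap, 0, pos), transcribed step for step from CPython (the getD default 0 is
-- never read: parentpos < pos < len).
def pvSiftdown (h : List Int) (pos : Nat) (x : Int) : List Int :=
  if hp : 0 < pos then
    let pp := (pos - 1) / 2
    let parent := h.getD pp 0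
    if x < parent then pvSiftdown (h.set pos parent) pp x
    else h.set pos x
  else h.set pos x
termination_by pos
decreasing_by omega

-- heapq.heappush: append then sift up
def pvHeappush (heap : List Int) (item : Int) : List Int :=
  pvSiftdown (heap ++ [item]) heap.length item

def minEnclosure (cows : List (Int × Int)) : Int :=
  let c0 := cows.headD (0, 0)            -- cows[0] (nonempty under Pre_)
  let l := c0.1
  let s1 := (PySem.List.slice cows (some 1) none).foldl   -- for x,y in cows[1:]
    (fun (s : List Int × List Int × List Int) p =>
      let minn := pvHeappush s.1 p.2
      let maxx := pvHeappush s.2.1 (-p.2)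
      let w := p.1 - l
      let hh := -(maxx.getD 0 0) - minn.getD 0 0          -- -maxx[0]-minn[0] (heaps nonempty)
      (minn, maxx, s.2.2 ++ [w * hh]))
    ([c0.2], [-c0.2], [0])
  let left := s1.2.2
  let cl := cows.getLastD (0, 0)         -- cows[-1]
  let r := cl.1
  let s2 := (PySem.List.slice ((PySem.List.slice? cows none none (-1)).getD []) (some 1) none).foldl  -- cows[::-1][1:]
    (fun (s : List Int × List Int × List Int) p =>
      let minn := pvHeappush s.1 p.2
      let maxx := pvHeappush s.2.1 (-p.2)
      let w := r - p.1
      let hh := -(maxx.getD 0 0) - minn.getD 0 0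
      (minn, maxx, s.2.2 ++ [w * hh]))
    ([cl.2], [-cl.2], [0])
  let right := s2.2.2.reverse
  match (left.zip (right.tail)).map (fun q => q.1 + q.2) with  -- min(a+b for a,b in zip(left, right[1:]))
  | [] => 0            -- Python min() raises on the empty generator; excluded by Pre_
  | a :: t => t.foldl min a

def solve (inp : List (Int × Int)) : Int :=
  let cows := inp
  let l := (PySem.List.min? (cows.map (fun p => p.1)) (fun x => x)).getD 0   -- min(i for i,_ in cows)
  let r := (PySem.List.max? (cows.map (fun p => p.1)) (fun x => x)).getD 0
  let d := (PySem.List.min? (cows.map (fun p => p.2)) (fun x => x)).getD 0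
  let u := (PySem.List.max? (cows.map (fun p => p.2)) (fun x => x)).getD 0
  let area1 := (r - l) * (u - d)
  let cows2 := PySem.List.sorted2 cows (fun p => p.1) (fun p => -p.2)       -- cows.sort(key=…)
  let area2 := min (minEnclosure cows2)
    (minEnclosure (PySem.List.sorted2 (cows2.map (fun p => (p.2, p.1))) (fun p => p.1) (fun p => -p.2)))
  area1 - area2

-- ===== PORT B =====
-- ext(i, j): min and max of the y-values of cows[i:j] (the slice is nonempty at every call)
def pvExt (cows : List (Int × Int)) (i j : Nat) : Int × Int :=
  match (PySem.List.slice cows (some (i : Int)) (some (j : Int))).map (fun p => p.2) with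
  | [] => (0, 0)                          -- Python's min([]) raises; unreachable (i < j ≤ len)
  | y :: t => (t.foldl min y, t.foldl max y)

-- comb(pre, e) with a non-None second argument (the shape of every comb call in B)
def pvCombL (pre : Option (Int × Int)) (e : Int × Int) : Int × Int :=
  match pre with
  | none => e
  | some a => (min a.1 e.1, max a.2 e.2)

def pvCombR (e : Int × Int) (suf : Option (Int × Int)) : Int × Int :=
  match suf with
  | none => e
  | some b => (min e.1 b.1, max e.2 b.2)

-- best(i, j, pre, suf); the guard is `j ≤ i + 1` rather than `j - i == 1` only to make the
-- Nat recursion total (calls with j ≤ i never occur: Python raises inside ext there)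
def pvBest (cows : List (Int × Int)) (l r : Int) (i j : Nat)
    (pre suf : Option (Int × Int)) : Option Int :=
  if h : j ≤ i + 1 then none
  else
    let m := (i + j) / 2
    let le := pvExt cows i m
    let re := pvExt cows m j
    let p1 := pvCombL pre le
    let s1 := pvCombR re suf
    let cand := ((cows.getD (m - 1) (0, 0)).1 - l) * (p1.2 - p1.1)
      + (r - (cows.getD m (0, 0)).1) * (s1.2 - s1.1)
    let bl := pvBest cows l r i m pre (some (pvCombR re suf))
    let br := pvBest cows l r m j (some (pvCombL pre le)) suf
    let cand := match bl with | none => cand | some b => min cand b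
    let cand := match br with | none => cand | some b => min cand b
    some cand
termination_by j - i
decreasing_by all_goals omega

def minEnclosureAlt (cows : List (Int × Int)) : Int :=
  let l := (cows.headD (0, 0)).1
  let r := (cows.getLastD (0, 0)).1
  (pvBest cows l r 0 cows.length none none).getD 0   -- none unreachable: 2 ≤ len under Pre_

def solve_alt (inp : List (Int × Int)) : Int :=
  let cows := inp
  let l := (PySem.List.min? (cows.map (fun p => p.1)) (fun x => x)).getD 0
  let r := (PySem.List.max? (cows.map (fun p => p.1)) (fun x => x)).getD 0
  let d := (PySem.List.min? (cows.map (fun p => p.2)) (fun x => x)).getD 0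
  let u := (PySem.List.max? (cows.map (fun p => p.2)) (fun x => x)).getD 0
  let area1 := (r - l) * (u - d)
  let cows2 := PySem.List.sorted2 cows (fun p => p.1) (fun p => -p.2)
  let area2 := min (minEnclosureAlt cows2)
    (minEnclosureAlt (PySem.List.sorted2 (cows2.map (fun p => (p.2, p.1))) (fun p => p.1) (fun p => -p.2)))
  area1 - area2

-- ===== PRECONDITION & SPEC =====
-- Pre_ excludes only lists of fewer than two cows, on which the Python A raises ValueError
-- (min() of an empty sequence).
def Pre_solve (inp : List (Int × Int)) : Prop := 2 ≤ inp.length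
instance (inp : List (Int × Int)) : Decidable (Pre_solve inp) := by unfold Pre_solve; infer_instance
def pvWitness_solve : (List (Int × Int)) := [(0, 0), (1, 1)]
def Spec_solve (inp : List (Int × Int)) (out : Int) : Prop := out = solve_alt inp
instance (inp : List (Int × Int)) (out : Int) : Decidable (Spec_solve inp out) := by unfold Spec_solve; infer_instance

-- ===== CLAIM (what is proved, stated in full; the proofs are below) =====
def Claim_equal_solve : Prop := ∀ (inp : List (Int × Int)), Dom_solve inp → Pre_solve inp → Spec_solve inp (solve inp)


-- ===== LEMMAS AND PROOFS =====

-- minimum / maximum of a nonempty list, as Python's min(list)/max(list) compute it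
def pvMinL : List Int → Int
  | [] => 0
  | a :: t => t.foldl min a

def pvMaxL : List Int → Int
  | [] => 0
  | a :: t => t.foldl max a

def pvYs (c : List (Int × Int)) : List Int := c.map (fun p => p.2)

-- the cost of splitting the sorted herd between cow k and cow k+1
def pvCand (cows : List (Int × Int)) (k : Nat) : Int :=
  ((cows.getD k (0, 0)).1 - (cows.headD (0, 0)).1)
      * (pvMaxL (pvYs (cows.take (k + 1))) - pvMinL (pvYs (cows.take (k + 1))))
  + ((cows.getLastD (0, 0)).1 - (cows.getD (k + 1) (0, 0)).1)
      * (pvMaxL (pvYs (cows.drop (k + 1))) - pvMinL (pvYs (cows.drop (k + 1))))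

-- ---- fold-min / fold-max toolkit ----

theorem pv_foldl_min_comm : ∀ (t : List Int) (a b : Int),
    t.foldl min (min a b) = min a (t.foldl min b) := by
  intro t
  induction t with
  | nil => intro a b; rfl
  | cons c s IH =>
    intro a b
    simp only [List.foldl_cons]
    rw [min_assoc, IH]

theorem pv_foldl_max_comm : ∀ (t : List Int) (a b : Int),
    t.foldl max (max a b) = max a (t.foldl max b) := by
  intro t
  induction t with
  | nil => intro a b; rfl
  | cons c s IH =>
    intro a b
    simp only [List.foldl_cons]
    rw [max_assoc, IH]

theorem pv_foldl_min_eq (l : List Int) (hl : l ≠ []) (a : Int) :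
    l.foldl min a = min a (pvMinL l) := by
  cases l with
  | nil => exact absurd rfl hl
  | cons b t => rw [List.foldl_cons, pv_foldl_min_comm, pvMinL]

theorem pv_foldl_max_eq (l : List Int) (hl : l ≠ []) (a : Int) :
    l.foldl max a = max a (pvMaxL l) := by
  cases l with
  | nil => exact absurd rfl hl
  | cons b t => rw [List.foldl_cons, pv_foldl_max_comm, pvMaxL]

theorem pvMinL_cons (a : Int) (t : List Int) (ht : t ≠ []) :
    pvMinL (a :: t) = min a (pvMinL t) := by
  rw [pvMinL, pv_foldl_min_eq t ht]

theorem pvMinL_append (u v : List Int) (hu : u ≠ []) (hv : v ≠ []) :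
    pvMinL (u ++ v) = min (pvMinL u) (pvMinL v) := by
  cases u with
  | nil => exact absurd rfl hu
  | cons a t =>
    show ((t ++ v).foldl min a) = _
    rw [List.foldl_append, pv_foldl_min_eq v hv, pvMinL]

theorem pvMaxL_append (u v : List Int) (hu : u ≠ []) (hv : v ≠ []) :
    pvMaxL (u ++ v) = max (pvMaxL u) (pvMaxL v) := by
  cases u with
  | nil => exact absurd rfl hu
  | cons a t =>
    show ((t ++ v).foldl max a) = _
    rw [List.foldl_append, pv_foldl_max_eq v hv, pvMaxL]

-- ---- B side: the divide and conquer computes the minimum split cost ----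

def pvSliceY (cows : List (Int × Int)) (a b : Nat) : List Int :=
  pvYs ((cows.drop a).take (b - a))

def pvExtP (cows : List (Int × Int)) (a b : Nat) : Int × Int :=
  (pvMinL (pvSliceY cows a b), pvMaxL (pvSliceY cows a b))

def pvExtOpt (cows : List (Int × Int)) (a b : Nat) : Option (Int × Int) :=
  if a < b then some (pvExtP cows a b) else none

theorem pvSliceY_ne_nil (cows : List (Int × Int)) (a b : Nat) (hab : a < b)
    (hb : b ≤ cows.length) : pvSliceY cows a b ≠ [] := by
  have : (pvSliceY cows a b).length = b - a := by
    simp [pvSliceY, pvYs, List.length_take, List.length_drop]; omega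
  intro h
  rw [h] at this
  simp at this
  omega

theorem pvSliceY_split (cows : List (Int × Int)) (a b c : Nat) (hab : a ≤ b) (hbc : b ≤ c) :
    pvSliceY cows a c = pvSliceY cows a b ++ pvSliceY cows b c := by
  unfold pvSliceY pvYs
  rw [← List.map_append]
  congr 1
  have h1 : c - a = (b - a) + (c - b) := by omega
  rw [h1, List.take_add, List.drop_drop, show a + (b - a) = b from by omega]

theorem pvExt_eq (cows : List (Int × Int)) (i j : Nat) (hij : i < j) (hj : j ≤ cows.length) :
    pvExt cows i j = pvExtP cows i j := by
  unfold pvExt pvExtP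
  rw [PySem.List.slice_natCast]
  have hne : pvSliceY cows i j ≠ [] := pvSliceY_ne_nil cows i j hij hj
  unfold pvSliceY pvYs at *
  cases h : ((cows.drop i).take (j - i)).map (fun p => p.2) with
  | nil => exact absurd h hne
  | cons y t => rfl

theorem pv_combL_ext (cows : List (Int × Int)) (i m : Nat) (him : i < m)
    (hm : m ≤ cows.length) :
    pvCombL (pvExtOpt cows 0 i) (pvExtP cows i m) = pvExtP cows 0 m := by
  rcases Nat.eq_zero_or_pos i with h0 | h0
  · subst h0
    rw [pvExtOpt, if_neg (by omega), pvCombL]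
  · rw [pvExtOpt, if_pos h0, pvCombL]
    have hsplit := pvSliceY_split cows 0 i m (by omega) (by omega)
    have h1 : pvSliceY cows 0 i ≠ [] := pvSliceY_ne_nil cows 0 i h0 (by omega)
    have h2 : pvSliceY cows i m ≠ [] := pvSliceY_ne_nil cows i m him hm
    simp only [pvExtP]
    rw [hsplit, pvMinL_append _ _ h1 h2, pvMaxL_append _ _ h1 h2]

theorem pv_combR_ext (cows : List (Int × Int)) (m j : Nat) (hmj : m < j)
    (hj : j ≤ cows.length) :
    pvCombR (pvExtP cows m j) (pvExtOpt cows j cows.length) = pvExtP cows m cows.length := by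
  rcases Nat.lt_or_ge j cows.length with hjn | hjn
  · rw [pvExtOpt, if_pos hjn, pvCombR]
    have hsplit := pvSliceY_split cows m j cows.length (by omega) (by omega)
    have h1 : pvSliceY cows m j ≠ [] := pvSliceY_ne_nil cows m j hmj hj
    have h2 : pvSliceY cows j cows.length ≠ [] := pvSliceY_ne_nil cows j _ hjn (by omega)
    simp only [pvExtP]
    rw [hsplit, pvMinL_append _ _ h1 h2, pvMaxL_append _ _ h1 h2]
  · have hje : j = cows.length := by omega
    subst hje
    rw [pvExtOpt, if_neg (by omega), pvCombR]

-- pvExtP specialized to the prefix / suffix slices pvCand is written with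
theorem pvExtP_prefix (cows : List (Int × Int)) (m : Nat) :
    pvExtP cows 0 m = (pvMinL (pvYs (cows.take m)), pvMaxL (pvYs (cows.take m))) := by
  simp [pvExtP, pvSliceY]

theorem pvExtP_suffix (cows : List (Int × Int)) (m : Nat) :
    pvExtP cows m cows.length = (pvMinL (pvYs (cows.drop m)), pvMaxL (pvYs (cows.drop m))) := by
  have : (cows.drop m).take (cows.length - m) = cows.drop m :=
    List.take_of_length_le (by simp)
  simp [pvExtP, pvSliceY, this]

theorem pv_min_rot (a b c : Int) : min (min a b) c = min b (min a c) := by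
  rw [min_comm a b, min_assoc]

theorem pvBest_eq (cows : List (Int × Int)) :
    ∀ (d i j : Nat), j - i ≤ d → i + 2 ≤ j → j ≤ cows.length →
    pvBest cows (cows.headD (0, 0)).1 (cows.getLastD (0, 0)).1 i j
        (pvExtOpt cows 0 i) (pvExtOpt cows j cows.length)
      = some (pvMinL ((List.range' i (j - i - 1)).map (pvCand cows))) := by
  intro d
  induction d with
  | zero => intro i j hd hij hj; omega
  | succ d IH =>
    intro i j hd hij hj
    have hguard : ¬ j ≤ i + 1 := by omega
    rw [pvBest]
    simp only [dif_neg hguard]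
    generalize hgm : (i + j) / 2 = m
    have him : i < m := by omega
    have hmj : m < j := by omega
    rw [pvExt_eq cows i m him (by omega), pvExt_eq cows m j hmj hj,
      pv_combL_ext cows i m him (by omega), pv_combR_ext cows m j hmj hj]
    have hOptPre : some (pvExtP cows 0 m) = pvExtOpt cows 0 m := by
      rw [pvExtOpt, if_pos (by omega)]
    have hOptSuf : some (pvExtP cows m cows.length) = pvExtOpt cows m cows.length := by
      rw [pvExtOpt, if_pos (by omega)]
    rw [hOptPre, hOptSuf]
    -- the middle candidate is pvCand (m-1)
    have hcand : ((cows.getD (m - 1) (0, 0)).1 - (cows.headD (0, 0)).1)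
          * ((pvExtP cows 0 m).2 - (pvExtP cows 0 m).1)
        + ((cows.getLastD (0, 0)).1 - (cows.getD m (0, 0)).1)
          * ((pvExtP cows m cows.length).2 - (pvExtP cows m cows.length).1)
        = pvCand cows (m - 1) := by
      rw [pvExtP_prefix, pvExtP_suffix, pvCand]
      have h1 : m - 1 + 1 = m := by omega
      rw [h1]
    -- range' split: gaps i..j-2 = (gaps i..m-2) ++ (m-1) :: (gaps m..j-2)
    have hsplit : List.range' i (j - i - 1)
        = List.range' i (m - i - 1) ++ (m - 1) :: List.range' m (j - m - 1) := by
      have e1 : (m - 1) :: List.range' m (j - m - 1) = List.range' (m - 1) (j - m) := by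
        obtain ⟨k, hk⟩ : ∃ k, j - m = k + 1 := ⟨j - m - 1, by omega⟩
        rw [show j - m - 1 = k from by omega, hk, List.range'_succ,
          show m - 1 + 1 = m from by omega]
      rw [e1]
      have e2 : i + 1 * (m - i - 1) = m - 1 := by omega
      have e3 : (m - i - 1) + (j - m) = j - i - 1 := by omega
      calc List.range' i (j - i - 1) = List.range' i ((m - i - 1) + (j - m)) := by rw [e3]
        _ = List.range' i (m - i - 1) ++ List.range' (i + 1 * (m - i - 1)) (j - m) :=
            (List.range'_append).symm
        _ = _ := by rw [e2]
    rw [hsplit]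
    by_cases hmi : m = i + 1
    · -- no gaps strictly inside the left half: bl = none
      have hbl : pvBest cows (cows.headD (0, 0)).1 (cows.getLastD (0, 0)).1 i m
          (pvExtOpt cows 0 i) (pvExtOpt cows m cows.length) = none := by
        rw [pvBest, dif_pos (by omega)]
      have hmap0 : List.range' i (m - i - 1) = [] := by
        have : m - i - 1 = 0 := by omega
        rw [this, List.range'_zero]
      by_cases hjm : j = m + 1
      · have hbr : pvBest cows (cows.headD (0, 0)).1 (cows.getLastD (0, 0)).1 m j
            (pvExtOpt cows 0 m) (pvExtOpt cows j cows.length) = none := by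
          rw [pvBest, dif_pos (by omega)]
        have hz : j - m - 1 = 0 := by omega
        rw [hbl, hbr, hmap0, hz, List.range'_zero]
        exact congrArg some hcand
      · have hbr := IH m j (by omega) (by omega) hj
        have hmapB_ne : (List.range' m (j - m - 1)).map (pvCand cows) ≠ [] := by
          apply List.ne_nil_of_length_pos
          simp only [List.length_map, List.length_range']
          omega
        rw [hbl, hbr, hmap0]
        refine congrArg some ?_
        rw [List.nil_append, List.map_cons, pvMinL_cons _ _ hmapB_ne, ← hcand]
    · have hbl := IH i m (by omega) (by omega) (by omega)
      have hmapA_ne : (List.range' i (m - i - 1)).map (pvCand cows) ≠ [] := by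
        apply List.ne_nil_of_length_pos
        simp only [List.length_map, List.length_range']
        omega
      by_cases hjm : j = m + 1
      · have hbr : pvBest cows (cows.headD (0, 0)).1 (cows.getLastD (0, 0)).1 m j
            (pvExtOpt cows 0 m) (pvExtOpt cows j cows.length) = none := by
          rw [pvBest, dif_pos (by omega)]
        have hz : j - m - 1 = 0 := by omega
        rw [hbl, hbr, hz, List.range'_zero]
        refine congrArg some ?_
        rw [List.map_append, List.map_cons, List.map_nil,
          pvMinL_append _ _ hmapA_ne (by simp),
          show pvMinL [pvCand cows (m - 1)] = pvCand cows (m - 1) from rfl, ← hcand]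
        exact min_comm _ _
      · have hbr := IH m j (by omega) (by omega) hj
        have hmapB_ne : (List.range' m (j - m - 1)).map (pvCand cows) ≠ [] := by
          apply List.ne_nil_of_length_pos
          simp only [List.length_map, List.length_range']
          omega
        rw [hbl, hbr]
        refine congrArg some ?_
        rw [List.map_append, List.map_cons,
          pvMinL_append _ _ hmapA_ne (by simp),
          pvMinL_cons _ _ hmapB_ne, ← hcand]
        exact pv_min_rot _ _ _

theorem lemB (cows : List (Int × Int)) (h2 : 2 ≤ cows.length) :
    minEnclosureAlt cows = pvMinL ((List.range (cows.length - 1)).map (pvCand cows)) := by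
  have hmain := pvBest_eq cows cows.length 0 cows.length (by omega) (by omega) (le_refl _)
  rw [show pvExtOpt cows 0 0 = none from by rw [pvExtOpt, if_neg (by omega)],
    show pvExtOpt cows cows.length cows.length = none from by
      rw [pvExtOpt, if_neg (by omega)]] at hmain
  show (pvBest cows (cows.headD (0, 0)).1 (cows.getLastD (0, 0)).1 0
      cows.length none none).getD 0 = _
  rw [hmain, List.range_eq_range']
  rfl

-- ---- A side: heap correctness (CPython heapq transcription) ----

theorem pv_getD_set_self {h : List Int} {i : Nat} (hi : i < h.length) (a : Int) :
    (h.set i a).getD i 0 = a := by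
  simp [List.getD_eq_getElem?_getD, hi]

theorem pv_getD_set_ne {h : List Int} {i j : Nat} (a : Int) (hne : i ≠ j) :
    (h.set i a).getD j 0 = h.getD j 0 := by
  simp [List.getD_eq_getElem?_getD, hne]

theorem pv_getD_append {h h' : List Int} {i : Nat} (hi : i < h.length) :
    (h ++ h').getD i 0 = h.getD i 0 := by
  simp [List.getD_eq_getElem?_getD, List.getElem?_append_left hi]

theorem pv_dropLast_reverse (l : List (Int × Int)) : l.dropLast.reverse = l.reverse.tail := by
  cases hl : l.reverse with
  | nil => simp [List.reverse_eq_nil_iff.mp hl]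
  | cons a t =>
    have : l = (a :: t).reverse := by rw [← hl, List.reverse_reverse]
    subst this
    simp

-- the min-heap invariant: every non-root element is ≥ its parent
def pvIsHeap (h : List Int) : Prop :=
  ∀ j : Nat, 0 < j → j < h.length → h.getD ((j - 1) / 2) 0 ≤ h.getD j 0

theorem pv_root_le (h : List Int) (pos : Nat)
    (H1 : ∀ j, 0 < j → j < h.length → j ≠ pos → h.getD ((j - 1) / 2) 0 ≤ h.getD j 0) :
    ∀ j, j < pos → j < h.length → h.getD 0 0 ≤ h.getD j 0 := by
  intro j
  induction j using Nat.strong_induction_on with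
  | _ j IH =>
    intro hjp hjl
    rcases Nat.eq_zero_or_pos j with h0 | h0
    · subst h0; exact le_refl _
    · have hpar : (j - 1) / 2 < j := by omega
      exact le_trans (IH _ hpar (by omega) (by omega)) (H1 j h0 hjl (by omega))

-- sift-up correctness: length preserved, heap property restored, and the new root is
-- min(old root, pushed item)
theorem pvSiftdown_spec (x : Int) : ∀ (pos : Nat) (h : List Int), pos < h.length →
    (∀ j, 0 < j → j < h.length → j ≠ pos → h.getD ((j - 1) / 2) 0 ≤ h.getD j 0) →
    (∀ j, 0 < j → j < h.length → (j - 1) / 2 = pos → x ≤ h.getD j 0) →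
    (0 < pos → ∀ j, 0 < j → j < h.length → (j - 1) / 2 = pos →
        h.getD ((pos - 1) / 2) 0 ≤ h.getD j 0) →
    (pvSiftdown h pos x).length = h.length ∧ pvIsHeap (pvSiftdown h pos x) ∧
      (pvSiftdown h pos x).getD 0 0 = if pos = 0 then x else min (h.getD 0 0) x := by
  intro pos
  induction pos using Nat.strong_induction_on with
  | _ pos IH =>
    intro h hlen H1 H2 H3
    rw [pvSiftdown]
    by_cases hp : 0 < pos
    · simp only [dif_pos hp]
      have hpplt : (pos - 1) / 2 < pos := by omega
      have hppl : (pos - 1) / 2 < h.length := by omega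
      by_cases hlt : x < h.getD ((pos - 1) / 2) 0
      · simp only [if_pos hlt]
        have key := IH ((pos - 1) / 2) hpplt (h.set pos (h.getD ((pos - 1) / 2) 0))
          (by simpa using hppl)
          (by -- heap except at the new hole
            intro j hj0 hjl hjpp
            rw [List.length_set] at hjl
            by_cases hjpos : j = pos
            · subst hjpos
              rw [pv_getD_set_ne _ (by omega : j ≠ (j - 1) / 2),
                pv_getD_set_self hlen]
            · rw [pv_getD_set_ne _ (fun e => hjpos e.symm)]
              by_cases hq : (j - 1) / 2 = pos
              · rw [hq, pv_getD_set_self hlen]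
                exact H3 hp j hj0 hjl hq
              · rw [pv_getD_set_ne _ (fun e => hq e.symm)]
                exact H1 j hj0 hjl hjpos
          )
          (by -- x below the children of the new hole
            intro j hj0 hjl hq
            rw [List.length_set] at hjl
            by_cases hjpos : j = pos
            · subst hjpos
              rw [pv_getD_set_self hlen]
              exact le_of_lt hlt
            · rw [pv_getD_set_ne _ (fun e => hjpos e.symm)]
              refine le_trans (le_of_lt hlt) ?_
              rw [← hq]
              exact H1 j hj0 hjl hjpos
          )
          (by -- grandparent below the children of the new hole
            intro hpp0 j hj0 hjl hq
            rw [List.length_set] at hjl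
            have hA : h.getD (((pos - 1) / 2 - 1) / 2) 0 ≤ h.getD ((pos - 1) / 2) 0 :=
              H1 _ hpp0 hppl (by omega)
            rw [pv_getD_set_ne _ (by omega : pos ≠ ((pos - 1) / 2 - 1) / 2)]
            by_cases hjpos : j = pos
            · subst hjpos
              rw [pv_getD_set_self hlen]
              exact hA
            · rw [pv_getD_set_ne _ (fun e => hjpos e.symm)]
              refine le_trans hA ?_
              rw [← hq]
              exact H1 j hj0 hjl hjpos
          )
        obtain ⟨klen, kheap, kroot⟩ := key
        refine ⟨by rw [klen, List.length_set], kheap, ?_⟩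
        rw [kroot, pv_getD_set_ne _ (by omega : pos ≠ 0)]
        by_cases hpp0 : (pos - 1) / 2 = 0
        · rw [if_pos hpp0, if_neg (by omega : ¬ pos = 0)]
          rw [hpp0] at hlt
          exact (min_eq_right (le_of_lt hlt)).symm
        · rw [if_neg hpp0, if_neg (by omega : ¬ pos = 0)]
      · simp only [if_neg hlt]
        refine ⟨by simp, ?_, ?_⟩
        · intro j hj0 hjl
          rw [List.length_set] at hjl
          by_cases hjpos : j = pos
          · subst hjpos
            rw [pv_getD_set_self hlen, pv_getD_set_ne _ (by omega : j ≠ (j - 1) / 2)]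
            exact not_lt.mp hlt
          · rw [pv_getD_set_ne _ (fun e => hjpos e.symm)]
            by_cases hq : (j - 1) / 2 = pos
            · rw [hq, pv_getD_set_self hlen]
              exact H2 j hj0 hjl hq
            · rw [pv_getD_set_ne _ (fun e => hq e.symm)]
              exact H1 j hj0 hjl hjpos
        · rw [if_neg (by omega : ¬ pos = 0), pv_getD_set_ne _ (by omega : pos ≠ 0)]
          exact (min_eq_left (le_trans (pv_root_le h pos H1 _ hpplt hppl) (not_lt.mp hlt))).symm
    · simp only [dif_neg hp]
      have hpos0 : pos = 0 := by omega
      subst hpos0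
      refine ⟨by simp, ?_, ?_⟩
      · intro j hj0 hjl
        rw [List.length_set] at hjl
        by_cases hq : (j - 1) / 2 = 0
        · rw [hq, pv_getD_set_self hlen, pv_getD_set_ne x (by omega)]
          exact H2 j hj0 hjl hq
        · rw [pv_getD_set_ne x (by omega), pv_getD_set_ne x (by omega)]
          exact H1 j hj0 hjl (by omega)
      · rw [if_pos rfl]
        exact pv_getD_set_self hlen x

-- heappush: one more element, still a heap, root = min(root, item)
theorem pvHeappush_spec (h : List Int) (x : Int) (hne : h ≠ []) (hh : pvIsHeap h) :
    (pvHeappush h x).length = h.length + 1 ∧ pvIsHeap (pvHeappush h x) ∧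
      (pvHeappush h x).getD 0 0 = min (h.getD 0 0) x := by
  have hl0 : 0 < h.length := List.length_pos_iff.mpr hne
  have key := pvSiftdown_spec x h.length (h ++ [x]) (by simp)
    (by
      intro j hj0 hjl hjne
      rw [List.length_append, List.length_cons, List.length_nil] at hjl
      have hjlt : j < h.length := by omega
      rw [pv_getD_append hjlt, pv_getD_append (by omega)]
      exact hh j hj0 hjlt)
    (by
      intro j hj0 hjl hq
      simp only [List.length_append, List.length_cons, List.length_nil] at hjl
      exact absurd hq (by omega))
    (by
      intro _ j hj0 hjl hq
      simp only [List.length_append, List.length_cons, List.length_nil] at hjl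
      exact absurd hq (by omega))
  obtain ⟨klen, kheap, kroot⟩ := key
  refine ⟨by rw [pvHeappush, klen]; simp, kheap, ?_⟩
  rw [pvHeappush, kroot, if_neg (by omega : ¬ h.length = 0), pv_getD_append hl0]

-- running widths of the enclosing rectangle while scanning e, starting from extrema (lo, hi)
def pvAreas (wf : Int → Int) : List (Int × Int) → Int → Int → List Int
  | [], _, _ => []
  | p :: t, lo, hi =>
      wf p.1 * (max hi p.2 - min lo p.2) :: pvAreas wf t (min lo p.2) (max hi p.2)

theorem pv_length_areas (wf : Int → Int) :
    ∀ (e : List (Int × Int)) (lo hi : Int), (pvAreas wf e lo hi).length = e.length := by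
  intro e
  induction e with
  | nil => intro lo hi; rfl
  | cons p t IH => intro lo hi; rw [pvAreas]; simp [IH]

-- A's heap-carrying pass computes the same appended list as the scalar recurrence
theorem pv_heap_pass (wf : Int → Int) :
    ∀ (e : List (Int × Int)) (mn mx : List Int) (lo hi : Int) (acc : List Int),
    pvIsHeap mn → pvIsHeap mx → mn ≠ [] → mx ≠ [] →
    mn.getD 0 0 = lo → mx.getD 0 0 = -hi →
    (e.foldl (fun (s : List Int × List Int × List Int) p =>
      (pvHeappush s.1 p.2, pvHeappush s.2.1 (-p.2),
        s.2.2 ++ [wf p.1 * (-(pvHeappush s.2.1 (-p.2)).getD 0 0 - (pvHeappush s.1 p.2).getD 0 0)]))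
      (mn, mx, acc)).2.2 = acc ++ pvAreas wf e lo hi := by
  intro e
  induction e with
  | nil => intro mn mx lo hi acc _ _ _ _ _ _; simp [pvAreas]
  | cons p t IH =>
    intro mn mx lo hi acc hmn hmx hmnne hmxne hlo hhi
    obtain ⟨l1, hp1, r1⟩ := pvHeappush_spec mn p.2 hmnne hmn
    obtain ⟨l2, hp2, r2⟩ := pvHeappush_spec mx (-p.2) hmxne hmx
    have hmin : (pvHeappush mn p.2).getD 0 0 = min lo p.2 := by rw [r1, hlo]
    have hmax : (pvHeappush mx (-p.2)).getD 0 0 = -max hi p.2 := by rw [r2, hhi]; omega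
    have hne1 : pvHeappush mn p.2 ≠ [] := by
      apply List.ne_nil_of_length_pos; omega
    have hne2 : pvHeappush mx (-p.2) ≠ [] := by
      apply List.ne_nil_of_length_pos; omega
    simp only [List.foldl_cons]
    rw [IH _ _ (min lo p.2) (max hi p.2) _ hp1 hp2 hne1 hne2 hmin hmax, pvAreas,
      hmin, hmax]
    have : -(-max hi p.2) - min lo p.2 = max hi p.2 - min lo p.2 := by ring
    rw [this, List.append_assoc, List.singleton_append]

-- the two passes, specialized to the ports' initial states
theorem pv_isHeap_singleton (a : Int) : pvIsHeap [a] := by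
  intro j hj hl
  simp only [List.length_cons, List.length_nil] at hl
  omega

theorem pv_passA (l y0 : Int) (e : List (Int × Int)) :
    (List.foldl (fun (s : List Int × List Int × List Int) p =>
      (pvHeappush s.1 p.2, pvHeappush s.2.1 (-p.2),
        s.2.2 ++ [(p.1 - l) * (-(pvHeappush s.2.1 (-p.2)).getD 0 0 - (pvHeappush s.1 p.2).getD 0 0)]))
      ([y0], [-y0], [0]) e).2.2 = 0 :: pvAreas (fun x => x - l) e y0 y0 :=
  pv_heap_pass (fun x => x - l) e [y0] [-y0] y0 y0 [0]
    (pv_isHeap_singleton y0) (pv_isHeap_singleton (-y0)) (by simp) (by simp) rfl (by simp)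

theorem pv_passA2 (r y0 : Int) (e : List (Int × Int)) :
    (List.foldl (fun (s : List Int × List Int × List Int) p =>
      (pvHeappush s.1 p.2, pvHeappush s.2.1 (-p.2),
        s.2.2 ++ [(r - p.1) * (-(pvHeappush s.2.1 (-p.2)).getD 0 0 - (pvHeappush s.1 p.2).getD 0 0)]))
      ([y0], [-y0], [0]) e).2.2 = 0 :: pvAreas (fun x => r - x) e y0 y0 :=
  pv_heap_pass (fun x => r - x) e [y0] [-y0] y0 y0 [0]
    (pv_isHeap_singleton y0) (pv_isHeap_singleton (-y0)) (by simp) (by simp) rfl (by simp)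

-- ---- fold extrema over reversed lists ----

theorem pv_foldl_min_min : ∀ (t : List Int) (a x : Int),
    t.foldl min (min a x) = min (t.foldl min a) x := by
  intro t
  induction t with
  | nil => intro a x; rfl
  | cons b s IH =>
    intro a x
    simp only [List.foldl_cons]
    rw [min_right_comm, IH]

theorem pv_foldl_max_max : ∀ (t : List Int) (a x : Int),
    t.foldl max (max a x) = max (t.foldl max a) x := by
  intro t
  induction t with
  | nil => intro a x; rfl
  | cons b s IH =>
    intro a x
    simp only [List.foldl_cons]
    rw [max_right_comm, IH]

theorem pv_foldl_min_reverse : ∀ (l : List Int) (a : Int),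
    l.reverse.foldl min a = l.foldl min a := by
  intro l
  induction l with
  | nil => intro a; rfl
  | cons x t IH =>
    intro a
    simp only [List.reverse_cons, List.foldl_append, List.foldl_cons, List.foldl_nil]
    rw [IH, pv_foldl_min_min]

theorem pv_foldl_max_reverse : ∀ (l : List Int) (a : Int),
    l.reverse.foldl max a = l.foldl max a := by
  intro l
  induction l with
  | nil => intro a; rfl
  | cons x t IH =>
    intro a
    simp only [List.reverse_cons, List.foldl_append, List.foldl_cons, List.foldl_nil]
    rw [IH, pv_foldl_max_max]

-- ---- pvAreas, element by element ----

theorem pvAreas_getElem (wf : Int → Int) :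
    ∀ (e : List (Int × Int)) (lo hi : Int) (j : Nat) (h : j < e.length),
    (pvAreas wf e lo hi)[j]'(by rw [pv_length_areas]; exact h)
      = wf ((e.getD j (0, 0)).1)
        * ((pvYs (e.take (j + 1))).foldl max hi - (pvYs (e.take (j + 1))).foldl min lo) := by
  intro e
  induction e with
  | nil => intro lo hi j h; simp at h
  | cons p t IH =>
    intro lo hi j h
    cases j with
    | zero => simp [pvAreas, pvYs]
    | succ k =>
      have hk : k < t.length := by simpa using h
      have := IH (min lo p.2) (max hi p.2) k hk
      simp only [pvAreas, List.getElem_cons_succ]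
      rw [this]
      simp [pvYs]

theorem pvYs_reverse (l : List (Int × Int)) : pvYs l.reverse = (pvYs l).reverse := by
  simp [pvYs]

theorem pvYs_append (u v : List (Int × Int)) : pvYs (u ++ v) = pvYs u ++ pvYs v := by
  simp [pvYs]

theorem pvAreas_getD (wf : Int → Int) (e : List (Int × Int)) (lo hi : Int) (j : Nat)
    (h : j < e.length) :
    (pvAreas wf e lo hi).getD j 0
      = wf ((e.getD j (0, 0)).1)
        * ((pvYs (e.take (j + 1))).foldl max hi - (pvYs (e.take (j + 1))).foldl min lo) := by
  rw [List.getD_eq_getElem _ _ (by rw [pv_length_areas]; exact h)]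
  exact pvAreas_getElem wf e lo hi j h

theorem pv_getD_dropLast (l : List (Int × Int)) (i : Nat) (h : i < l.dropLast.length) :
    l.dropLast.getD i (0, 0) = l.getD i (0, 0) := by
  rw [List.getD_eq_getElem _ _ h, List.getD_eq_getElem _ _ (by simp at h ⊢; omega),
    List.getElem_dropLast]

-- the k-th entry of A's `left` list is the left factor of pvCand k
theorem pv_L_getD (c0 : Int × Int) (e : List (Int × Int)) (k : Nat) (hk : k < e.length + 1) :
    (0 :: pvAreas (fun x => x - c0.1) e c0.2 c0.2).getD k 0
      = (((c0 :: e).getD k (0, 0)).1 - ((c0 :: e).headD (0, 0)).1)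
        * (pvMaxL (pvYs ((c0 :: e).take (k + 1))) - pvMinL (pvYs ((c0 :: e).take (k + 1)))) := by
  cases k with
  | zero => simp
  | succ k =>
    have hk' : k < e.length := by omega
    rw [List.getD_cons_succ, pvAreas_getD _ e _ _ k hk', List.getD_cons_succ,
      List.take_succ_cons, List.headD_cons]
    rfl

-- the k-th entry of A's reversed `right` tail is the right factor of pvCand k
theorem pv_R_getD (c0 : Int × Int) (e : List (Int × Int)) (k : Nat) (hk : k < e.length) :
    ((0 :: pvAreas (fun x => ((c0 :: e).getLastD (0, 0)).1 - x) (c0 :: e).reverse.tail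
        ((c0 :: e).getLastD (0, 0)).2 ((c0 :: e).getLastD (0, 0)).2).reverse.tail).getD k 0
      = (((c0 :: e).getLastD (0, 0)).1 - ((c0 :: e).getD (k + 1) (0, 0)).1)
        * (pvMaxL (pvYs ((c0 :: e).drop (k + 1))) - pvMinL (pvYs ((c0 :: e).drop (k + 1)))) := by
  rw [List.getD_eq_getElem _ _ (by simp [pv_length_areas]; omega), List.getElem_tail,
    List.getElem_reverse, ← List.getD_eq_getElem _ (0 : Int) (by simp [pv_length_areas]; try omega)]
  have hidx : (0 :: pvAreas (fun x => ((c0 :: e).getLastD (0, 0)).1 - x) (c0 :: e).reverse.tail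
      ((c0 :: e).getLastD (0, 0)).2 ((c0 :: e).getLastD (0, 0)).2).length - 1 - (k + 1)
      = e.length - 1 - k := by
    simp [pv_length_areas]
    omega
  rw [hidx]
  by_cases hlast : k = e.length - 1
  · have h0 : e.length - 1 - k = 0 := by omega
    have hgd : (c0 :: e).getD (k + 1) (0, 0) = (c0 :: e).getLastD (0, 0) := by
      rw [List.getD_eq_getElem?_getD, List.getLastD_eq_getLast?, List.getLast?_eq_getElem?]
      congr 2
      simp
      omega
    rw [h0, List.getD_cons_zero, hgd, sub_self, zero_mul]
  · have hj : e.length - 1 - k = (e.length - 2 - k) + 1 := by omega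
    have hjlen : e.length - 2 - k < (c0 :: e).reverse.tail.length := by simp; omega
    rw [hj, List.getD_cons_succ, pvAreas_getD _ _ _ _ _ hjlen, ← pv_dropLast_reverse]
    have hg1 : (c0 :: e).dropLast.reverse.getD (e.length - 2 - k) (0, 0)
        = (c0 :: e).getD (k + 1) (0, 0) := by
      rw [List.getD_eq_getElem _ _ (by simp; omega), List.getElem_reverse,
        ← List.getD_eq_getElem _ ((0, 0) : Int × Int) (by simp; omega)]
      have hix : (c0 :: e).dropLast.length - 1 - (e.length - 2 - k) = k + 1 := by
        simp
        omega
      rw [hix, pv_getD_dropLast _ _ (by simp; omega)]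
    have hg2 : (c0 :: e).dropLast.reverse.take (e.length - 2 - k + 1)
        = ((c0 :: e).dropLast.drop (k + 1)).reverse := by
      rw [List.take_reverse,
        show (c0 :: e).dropLast.length - (e.length - 2 - k + 1) = k + 1 from by simp; omega]
    rw [hg1, hg2, pvYs_reverse, pv_foldl_max_reverse, pv_foldl_min_reverse]
    have hconc : (c0 :: e).dropLast ++ [(c0 :: e).getLast (by simp)] = c0 :: e :=
      List.dropLast_concat_getLast (by simp)
    have hdrop : (c0 :: e).drop (k + 1)
        = (c0 :: e).dropLast.drop (k + 1) ++ [(c0 :: e).getLast (by simp)] := by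
      conv_lhs => rw [← hconc]
      rw [List.drop_append_of_le_length (by simp; omega)]
    have hvne : pvYs ((c0 :: e).dropLast.drop (k + 1)) ≠ [] := by
      apply List.ne_nil_of_length_pos
      simp [pvYs]
      omega
    have hylast : (c0 :: e).getLastD (0, 0) = (c0 :: e).getLast (by simp) := by
      rw [List.getLastD_eq_getLast?, List.getLast?_eq_getLast (by simp)]
      rfl
    rw [hdrop, pvYs_append,
      pvMaxL_append _ _ hvne (by simp [pvYs]), pvMinL_append _ _ hvne (by simp [pvYs]),
      show pvMaxL (pvYs [(c0 :: e).getLast (by simp)]) = ((c0 :: e).getLast (by simp)).2 from rfl,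
      show pvMinL (pvYs [(c0 :: e).getLast (by simp)]) = ((c0 :: e).getLast (by simp)).2 from rfl,
      pv_foldl_max_eq _ hvne, pv_foldl_min_eq _ hvne, hylast, max_comm, min_comm]

theorem lemA (cows : List (Int × Int)) (h2 : 2 ≤ cows.length) :
    minEnclosure cows = pvMinL ((List.range (cows.length - 1)).map (pvCand cows)) := by
  cases cows with
  | nil => simp at h2
  | cons c0 e =>
    have he : 1 ≤ e.length := by simp at h2; omega
    simp only [minEnclosure, PySem.List.slice_from_one, PySem.List.slice?_none_none_neg_one,
      Option.getD_some, List.headD_cons, List.tail_cons]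
    rw [pv_passA, pv_passA2]
    have hM : List.map (fun q => q.1 + q.2) ((0 :: pvAreas (fun x => x - c0.1) e c0.2 c0.2).zip
        ((0 :: pvAreas (fun x => ((c0 :: e).getLastD (0, 0)).1 - x) (c0 :: e).reverse.tail
          ((c0 :: e).getLastD (0, 0)).2 ((c0 :: e).getLastD (0, 0)).2).reverse.tail))
        = List.map (pvCand (c0 :: e)) (List.range ((c0 :: e).length - 1)) := by
      apply List.ext_getElem
      · simp [pv_length_areas]
      · intro k h1' h2'
        have hk : k < e.length := by
          simp [pv_length_areas] at h1'
          omega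
        simp only [List.getElem_map, List.getElem_zip, List.getElem_range]
        rw [← List.getD_eq_getElem _ (0 : Int) (by simp [pv_length_areas]; omega),
          ← List.getD_eq_getElem _ (0 : Int) (by simp [pv_length_areas]; omega),
          pv_L_getD c0 e k (by omega), pv_R_getD c0 e k hk, pvCand]
    rw [hM]
    have hne : List.map (pvCand (c0 :: e)) (List.range ((c0 :: e).length - 1)) ≠ [] := by
      apply List.ne_nil_of_length_pos
      simp
      omega
    cases hK : List.map (pvCand (c0 :: e)) (List.range ((c0 :: e).length - 1)) with
    | nil => exact absurd hK hne
    | cons a t => rfl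

theorem minEnclosure_eq (cows : List (Int × Int)) (h2 : 2 ≤ cows.length) :
    minEnclosure cows = minEnclosureAlt cows := by
  rw [lemA cows h2, lemB cows h2]

-- ===== VERDICT (by name: the statement is the Claim_ definition above) =====
theorem solve_spec : Claim_equal_solve := by
  intro inp _ hpre
  have h1 : 2 ≤ (PySem.List.sorted2 inp (fun p => p.1) (fun p => -p.2)).length := by
    rw [(PySem.List.sorted2_perm _ _ _ _).length_eq]; exact hpre
  have h2 : 2 ≤ (PySem.List.sorted2
      ((PySem.List.sorted2 inp (fun p => p.1) (fun p => -p.2)).map (fun p => (p.2, p.1)))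
      (fun p => p.1) (fun p => -p.2)).length := by
    rw [(PySem.List.sorted2_perm _ _ _ _).length_eq, List.length_map]; exact h1
  unfold Spec_solve
  simp only [solve, solve_alt, minEnclosure_eq _ h1, minEnclosure_eq _ h2]
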